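-- pv_equiv track=rewrite | github.com/TinkerTools/poltype2 | PoltypeModules/fragmenter.py | GenerateAtomIndexToSMARTSPosition
-- ===== SOURCE A (Python) =====
-- def GenerateAtomIndexToSMARTSPosition(poltype,fragidxarray):
--     """
--     Intent:
--     Input:
--     Output:
--     Referenced By:
--     Description:
--     """
--     atomindextosmartspos={}
--     totalatoms=len(fragidxarray)
--     for i in range(totalatoms):
--         atomindex=i+1
--         if (atomindex+1) in fragidxarray:
--             fragidxarraypos=fragidxarray.index(atomindex+1)
--             smilespos=fragidxarraypos+1
--             atomindextosmartspos[atomindex]=smilespos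
--
--     return atomindextosmartspos
-- ===== SOURCE B (Python) =====
-- def GenerateAtomIndexToSMARTSPosition(poltype, fragidxarray):
--     # Single forward pass over array positions: each value v claims key v-1 (first
--     # occurrence wins) when the key lies in 1..len; keys are then emitted sorted,
--     # which is exactly A's increasing-atomindex insertion order.
--     n = len(fragidxarray)
--     d = {}
--     for pos, value in enumerate(fragidxarray):
--         key = value - 1
--         if 1 <= key <= n and key not in d:
--             d[key] = pos + 1
--     return {k: d[k] for k in sorted(d)}
-- ===== Notes on version B (the rewrite author's own statement) =====
-- stated objective: faster
-- what changed: A loops over candidate atom indices and for each rescans the list with 'in' and .index; B makes one forward pass over array positions in which each value v claims key v-1 at first occurrence (range-guarded), then emits the keys sorted, so the repeated list scans disappear.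
import Mathlib
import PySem

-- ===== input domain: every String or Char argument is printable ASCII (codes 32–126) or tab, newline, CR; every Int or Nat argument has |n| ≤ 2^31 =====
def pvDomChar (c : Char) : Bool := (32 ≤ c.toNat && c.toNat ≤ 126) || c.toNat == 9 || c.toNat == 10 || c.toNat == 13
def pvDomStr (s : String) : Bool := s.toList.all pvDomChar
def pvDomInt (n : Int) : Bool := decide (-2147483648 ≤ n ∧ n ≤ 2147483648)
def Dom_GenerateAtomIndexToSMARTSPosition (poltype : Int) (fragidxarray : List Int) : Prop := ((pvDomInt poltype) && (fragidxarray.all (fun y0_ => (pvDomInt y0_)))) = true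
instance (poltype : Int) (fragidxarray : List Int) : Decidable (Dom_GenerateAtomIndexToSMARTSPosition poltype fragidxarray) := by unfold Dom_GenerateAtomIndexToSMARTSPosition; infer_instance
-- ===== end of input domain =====

-- B drops A's candidate-index loop with its repeated 'in'/.index list scans: one forward pass over
-- array positions lets each value v claim key v-1 at first occurrence (range-guarded), then the
-- keys are emitted sorted, which is A's increasing-key insertion order (faster).

-- ===== PORT A =====
def GenerateAtomIndexToSMARTSPosition (poltype : Int) (fragidxarray : List Int) : List (Int × Int) :=
  let totalatoms : Int := fragidxarray.length
  ((PySem.List.pyRange 0 totalatoms 1).foldl (fun d i =>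
      let atomindex := i + 1
      if (atomindex + 1) ∈ fragidxarray then
        -- fragidxarray.index(atomindex+1): the guard guarantees membership, so index? is some
        match PySem.List.index? fragidxarray (atomindex + 1) with
        | some fragidxarraypos => d.insert atomindex ((fragidxarraypos : Int) + 1)
        | none => d
      else d) (PySem.Dict.empty : PySem.Dict Int Int)).items

-- ===== PORT B =====
def GenerateAtomIndexToSMARTSPosition_alt (poltype : Int) (fragidxarray : List Int) : List (Int × Int) :=
  let n : Int := fragidxarray.length
  let d : PySem.Dict Int Int :=
    (PySem.List.enumerate fragidxarray 0).foldl
      (fun d pv =>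
        let key := pv.2 - 1
        if (1 ≤ key ∧ key ≤ n) ∧ ¬ d.contains key then d.insert key (pv.1 + 1) else d)
      PySem.Dict.empty
  -- {k: d[k] for k in sorted(d)}; each k is a key of d, so d[k] cannot raise and getD is exact
  ((PySem.List.sorted d.keys (fun k => k) false).foldl
      (fun r k => r.insert k (d.getD k 0)) (PySem.Dict.empty : PySem.Dict Int Int)).items

-- ===== PRECONDITION & SPEC =====
def Spec_GenerateAtomIndexToSMARTSPosition (poltype : Int) (fragidxarray : List Int) (out : List (Int × Int)) : Prop := out = GenerateAtomIndexToSMARTSPosition_alt poltype fragidxarray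
instance (poltype : Int) (fragidxarray : List Int) (out : List (Int × Int)) : Decidable (Spec_GenerateAtomIndexToSMARTSPosition poltype fragidxarray out) := by unfold Spec_GenerateAtomIndexToSMARTSPosition; infer_instance

-- ===== CLAIM (what is proved, stated in full; the proofs are below) =====
def Claim_equal_GenerateAtomIndexToSMARTSPosition : Prop := ∀ (poltype : Int) (fragidxarray : List Int), Dom_GenerateAtomIndexToSMARTSPosition poltype fragidxarray → Spec_GenerateAtomIndexToSMARTSPosition poltype fragidxarray (GenerateAtomIndexToSMARTSPosition poltype fragidxarray)

-- ===== LEMMAS AND PROOFS =====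

-- a guarded-insert loop is the insert loop over the filtered list (guard independent of the dict)
theorem pv_foldl_if_filter {α : Type} (l : List α) (c : α → Bool)
    (f : PySem.Dict Int Int → α → PySem.Dict Int Int) (d : PySem.Dict Int Int) :
    l.foldl (fun d a => if c a then f d a else d) d = (l.filter c).foldl f d := by
  induction l generalizing d with
  | nil => rfl
  | cons x xs ih =>
    by_cases hx : c x = true
    · simp [hx, ih]
    · simp only [Bool.not_eq_true] at hx
      simp [hx, ih]

-- B's first pass keeps keys nodup
theorem pv_nodup_B (n : Int) (l : List (Int × Int)) (d : PySem.Dict Int Int)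
    (h : (PySem.Dict.keys d).Nodup) :
    (PySem.Dict.keys (l.foldl
      (fun d pv => if (1 ≤ pv.2 - 1 ∧ pv.2 - 1 ≤ n) ∧ ¬ d.contains (pv.2 - 1)
                   then d.insert (pv.2 - 1) (pv.1 + 1) else d) d)).Nodup := by
  induction l generalizing d with
  | nil => exact h
  | cons p l ih =>
    rw [List.foldl_cons]
    split_ifs with hc
    · exact ih _ (PySem.Dict.nodup_keys_insert _ _ _ h)
    · exact ih _ h

-- lookup in B's first-pass dict: first occurrence of k+1 in xs, guarded by 1 ≤ k ≤ n
theorem pv_B_get? (n : Int) (xs : List Int) (s : Int) (d : PySem.Dict Int Int) (k : Int) :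
    ((PySem.List.enumerate xs s).foldl
      (fun d pv => if (1 ≤ pv.2 - 1 ∧ pv.2 - 1 ≤ n) ∧ ¬ d.contains (pv.2 - 1)
                   then d.insert (pv.2 - 1) (pv.1 + 1) else d) d).get? k =
    if d.contains k then d.get? k
    else if 1 ≤ k ∧ k ≤ n then (PySem.List.index? xs (k + 1)).map (fun p => s + (p : Int) + 1)
    else none := by
  induction xs generalizing s d with
  | nil =>
    simp only [PySem.List.enumerate_nil, List.foldl_nil, PySem.List.index?_eq_idxOf?,
      List.idxOf?_nil]
    by_cases h : d.contains k = true
    · simp [h]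
    · simp only [Bool.not_eq_true] at h
      simp [h, (PySem.Dict.get?_eq_none_iff_contains d k).mpr h]
  | cons x xs ih =>
    rw [PySem.List.enumerate_cons, List.foldl_cons]
    by_cases hx : x = k + 1
    · subst hx
      have hk : k + 1 - 1 = k := by ring
      by_cases hc : d.contains k = true
      · simp only [hk, hc, not_true_eq_false, and_false, if_false, ih]
        simp
      · simp only [Bool.not_eq_true] at hc
        by_cases hP : 1 ≤ k ∧ k ≤ n
        · simp only [hk, hP, hc, Bool.false_eq_true, not_false_eq_true, and_self, if_true, ih]
          rw [if_pos (by simp [PySem.Dict.contains_insert_self]),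
            PySem.Dict.get?_insert_self, PySem.List.index?_cons_self]
          simp
        · simp only [hk, hP, false_and, if_false, ih, hc, Bool.false_eq_true, if_false,
            PySem.List.index?_cons_self]
    · have hne : x - 1 ≠ k := by omega
      have hstep : ∀ d' : PySem.Dict Int Int,
          PySem.Dict.contains (if (1 ≤ x - 1 ∧ x - 1 ≤ n) ∧ ¬ d'.contains (x - 1)
           then d'.insert (x - 1) (s + 1) else d') k = d'.contains k := by
        intro d'
        split_ifs with hc
        · have hkx : (k == x - 1) = false := by simp [Ne.symm hne]
          simp [PySem.Dict.contains_insert, hkx]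
        · rfl
      have hget : ∀ d' : PySem.Dict Int Int,
          PySem.Dict.get? (if (1 ≤ x - 1 ∧ x - 1 ≤ n) ∧ ¬ d'.contains (x - 1)
           then d'.insert (x - 1) (s + 1) else d') k = d'.get? k := by
        intro d'
        split_ifs with hc
        · exact PySem.Dict.get?_insert_of_ne _ _ (Ne.symm hne)
        · rfl
      rw [ih, hstep d, hget d]
      by_cases hc : d.contains k = true
      · simp [hc]
      · simp only [Bool.not_eq_true] at hc
        simp only [hc, Bool.false_eq_true, if_false]
        by_cases hP : 1 ≤ k ∧ k ≤ n
        · simp only [hP]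
          rw [PySem.List.index?_cons_of_ne _ hx]
          cases PySem.List.index? xs (k + 1) with
          | none => simp
          | some p =>
            simp only [Option.pure_def, Option.bind_eq_bind, Option.bind_some,
              Option.map_some]
            push_cast
            ring
        · simp [hP]

-- abbreviation used only by the proofs: the filtered candidate list
def pvFiltered (xs : List Int) : List Nat :=
  (List.range xs.length).filter (fun i => decide (((i : Int) + 1 + 1) ∈ xs))

-- A's result, in closed list form
theorem pv_A_eq (poltype : Int) (xs : List Int) :
    GenerateAtomIndexToSMARTSPosition poltype xs =
      (pvFiltered xs).map (fun (i : Nat) =>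
        (((i : Int) + 1), ((PySem.List.index? xs ((i : Int) + 1 + 1)).getD 0 : Int) + 1)) := by
  unfold GenerateAtomIndexToSMARTSPosition
  simp only [PySem.List.pyRange_one]
  have h1 : ((xs.length : Int) - 0).toNat = xs.length := by omega
  rw [h1, List.foldl_map]
  have hext : (List.range xs.length).foldl
      (fun (d : PySem.Dict Int Int) (k : Nat) =>
        if ((0 : Int) + k + 1 + 1) ∈ xs then
          match PySem.List.index? xs ((0 : Int) + k + 1 + 1) with
          | some p => d.insert ((0 : Int) + k + 1) ((p : Int) + 1)
          | none => d
        else d) PySem.Dict.empty =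
      (List.range xs.length).foldl
      (fun (d : PySem.Dict Int Int) (k : Nat) =>
        if decide ((((k : Int) + 1 + 1) ∈ xs)) then
          d.insert ((k : Int) + 1) (((PySem.List.index? xs ((k : Int) + 1 + 1)).getD 0 : Int) + 1)
        else d) PySem.Dict.empty := by
    apply List.foldl_ext
    intro d k hk
    simp only [zero_add]
    by_cases hm : ((k : Int) + 1 + 1) ∈ xs
    · have hs : (PySem.List.index? xs ((k : Int) + 1 + 1)).isSome := by
        rw [PySem.List.index?_isSome_iff]; exact hm
      cases hp : PySem.List.index? xs ((k : Int) + 1 + 1) with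
      | none => rw [hp] at hs; simp at hs
      | some p => simp [hm]
    · simp [hm]
  rw [hext, pv_foldl_if_filter]
  rw [PySem.Dict.items_foldl_insert_fresh]
  · simp only [pvFiltered]
    rfl
  · intro a _; simp
  · have : Function.Injective (fun k : Nat => (k : Int) + 1) := by
      intro a b h; simpa using h
    exact ((List.nodup_range).filter _).map this

-- proof-only abbreviation: B's first-pass dict
def pvD (xs : List Int) : PySem.Dict Int Int :=
  (PySem.List.enumerate xs 0).foldl
    (fun d pv => if (1 ≤ pv.2 - 1 ∧ pv.2 - 1 ≤ (xs.length : Int)) ∧ ¬ d.contains (pv.2 - 1)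
                 then d.insert (pv.2 - 1) (pv.1 + 1) else d) PySem.Dict.empty

theorem pv_nodup_keys_D (xs : List Int) : (PySem.Dict.keys (pvD xs)).Nodup :=
  pv_nodup_B _ _ _ (by simp)

theorem pv_filtered_map_nodup (xs : List Int) :
    ((pvFiltered xs).map (fun (i : Nat) => (i : Int) + 1)).Nodup := by
  have hinj : Function.Injective (fun k : Nat => (k : Int) + 1) := by
    intro a b h; simpa using h
  exact ((List.nodup_range).filter _).map hinj

-- the key list of B's dict equals the (strictly increasing) key list of A's result
theorem pv_sorted_keys (xs : List Int) :
    PySem.List.sorted (PySem.Dict.keys (pvD xs)) (fun k => k) false =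
    (pvFiltered xs).map (fun (i : Nat) => (i : Int) + 1) := by
  apply PySem.List.sorted_eq_of_perm_of_pairwise_lt
  · -- permutation: both nodup with the same members
    rw [List.perm_ext_iff_of_nodup (pv_filtered_map_nodup xs) (pv_nodup_keys_D xs)]
    intro m
    have hmem : m ∈ PySem.Dict.keys (pvD xs) ↔
        (1 ≤ m ∧ m ≤ (xs.length : Int)) ∧ (m + 1) ∈ xs := by
      rw [← PySem.Dict.contains_iff_mem_keys]
      rw [PySem.Dict.contains_eq_isSome_get?, pvD, pv_B_get?]
      simp only [PySem.Dict.contains_empty, Bool.false_eq_true, if_false]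
      cases hp : PySem.List.index? xs (m + 1) with
      | none =>
        have hnm := (PySem.List.index?_eq_none_iff xs _).mp hp
        by_cases hP : 1 ≤ m ∧ m ≤ (xs.length : Int) <;> simp [hP, hnm]
      | some p =>
        have hm2 : (m + 1) ∈ xs := by rw [← PySem.List.index?_isSome_iff, hp]; rfl
        by_cases hP : 1 ≤ m ∧ m ≤ (xs.length : Int) <;> simp [hP, hm2]
    rw [List.mem_map, hmem]
    constructor
    · rintro ⟨i, hi, rfl⟩
      have hir : i ∈ List.range xs.length := List.mem_of_mem_filter hi
      have hil := List.mem_range.mp hir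
      have hic := (List.mem_filter.mp hi).2
      simp only [decide_eq_true_eq] at hic
      exact ⟨⟨by omega, by omega⟩, hic⟩
    · rintro ⟨⟨h1, h2⟩, hmem2⟩
      refine ⟨(m - 1).toNat, ?_, by omega⟩
      simp only [pvFiltered, List.mem_filter, List.mem_range, decide_eq_true_eq]
      constructor
      · omega
      · have hm : ((m - 1).toNat : Int) + 1 + 1 = m + 1 := by omega
        rw [hm]; exact hmem2
  · -- strictly increasing
    rw [List.pairwise_map]
    refine (List.Pairwise.sublist List.filter_sublist List.pairwise_lt_range).imp ?_
    intro a b h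
    omega

theorem pv_main (poltype : Int) (xs : List Int) :
    GenerateAtomIndexToSMARTSPosition poltype xs = GenerateAtomIndexToSMARTSPosition_alt poltype xs := by
  have hB : GenerateAtomIndexToSMARTSPosition_alt poltype xs =
      ((PySem.List.sorted (PySem.Dict.keys (pvD xs)) (fun k => k) false).foldl
        (fun r k => r.insert k ((pvD xs).getD k 0))
        (PySem.Dict.empty : PySem.Dict Int Int)).items := rfl
  rw [hB, pv_sorted_keys xs]
  rw [PySem.Dict.items_foldl_insert_fresh]
  · rw [pv_A_eq poltype xs, List.map_map]
    rw [show (PySem.Dict.empty : PySem.Dict Int Int).items = ([] : List (Int × Int)) from rfl,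
      List.nil_append]
    apply List.map_congr_left
    intro i hi
    have hir := List.mem_range.mp (List.mem_of_mem_filter hi)
    have hic := (List.mem_filter.mp hi).2
    simp only [decide_eq_true_eq] at hic
    have hget : (pvD xs).getD ((i : Int) + 1) 0 =
        ((PySem.List.index? xs ((i : Int) + 1 + 1)).getD 0 : Int) + 1 := by
      rw [PySem.Dict.getD_eq_get?_getD, pvD, pv_B_get?]
      simp only [PySem.Dict.contains_empty, Bool.false_eq_true, if_false]
      rw [if_pos ⟨by omega, by omega⟩]
      have hs : (PySem.List.index? xs ((i : Int) + 1 + 1)).isSome := by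
        rw [PySem.List.index?_isSome_iff]; exact hic
      cases hp : PySem.List.index? xs ((i : Int) + 1 + 1) with
      | none => rw [hp] at hs; simp at hs
      | some p => simp
    simp [Function.comp, hget]
  · intro a _; simp
  · simpa using pv_filtered_map_nodup xs

-- ===== VERDICT (by name: the statement is the Claim_ definition above) =====
theorem GenerateAtomIndexToSMARTSPosition_spec : Claim_equal_GenerateAtomIndexToSMARTSPosition := by
  intro poltype xs _
  exact pv_main poltype xs
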